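-- pv_equiv track=rewrite | github.com/Convergent-Sequence/n-ary-topology | ntop.py | usual_closure
-- ===== SOURCE A (Python) =====
-- from itertools import chain, combinations, product
--
-- def power_set(s:set):
--     return list(set(x) for x in chain.from_iterable(combinations(s, r) for r in range(len(s) + 1)))
--
-- def usual_closure(z, tau, s):
--     closure = []
--     for elementp in power_set(z):
--         if s.issubset(elementp) and (z - elementp) in tau:
--             closure.append(elementp)
--     if not closure:
--         return set()  # This point shouldnt be reached, yet we implement it
--     return set.intersection(*closure)
-- ===== SOURCE B (Python) =====
-- def usual_closure(z, tau, s):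
--     result = None
--     for o in tau:
--         if o.issubset(z):
--             f = z - o
--             if s.issubset(f):
--                 result = f if result is None else result & f
--     return set() if result is None else result
-- ===== Notes on version B (the rewrite author's own statement) =====
-- stated objective: faster
-- what changed: Instead of enumerating all 2^|z| subsets of z and testing each as a candidate closed set, B makes a single pass over tau, forms the closed set z - o for each open o that is a subset of z, and intersects those closed sets that contain s.
import Mathlib
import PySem

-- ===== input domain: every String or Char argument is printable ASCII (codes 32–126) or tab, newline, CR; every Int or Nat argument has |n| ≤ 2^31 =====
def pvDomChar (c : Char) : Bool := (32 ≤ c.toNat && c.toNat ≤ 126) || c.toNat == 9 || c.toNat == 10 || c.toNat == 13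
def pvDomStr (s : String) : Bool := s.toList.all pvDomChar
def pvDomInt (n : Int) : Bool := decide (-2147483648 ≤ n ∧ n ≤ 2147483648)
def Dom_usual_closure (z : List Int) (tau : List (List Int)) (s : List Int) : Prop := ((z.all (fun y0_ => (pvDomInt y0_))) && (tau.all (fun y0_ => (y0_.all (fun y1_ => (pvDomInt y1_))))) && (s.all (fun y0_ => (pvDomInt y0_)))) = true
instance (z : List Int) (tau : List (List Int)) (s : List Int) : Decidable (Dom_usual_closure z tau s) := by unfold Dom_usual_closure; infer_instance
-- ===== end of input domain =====

-- B replaces A's exponential power-set enumeration by one pass over tau (objective: faster,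
-- asymptotically). Both Pythons return a set; the ports return its distinct elements in a
-- canonical (first-occurrence-of-z) order, which is the convention for set-valued results.

-- ===== PORT A =====
-- power_set(z): all subsets of z, by size then combination order (each combination, being a
-- combination of the distinct elements of a set, is already duplicate-free).
def power_set (l : List Int) : List (List Int) :=
  (List.range (l.length + 1)).flatMap (fun r => PySem.List.combinations l r)

def usual_closure (z : List Int) (tau : List (List Int)) (s : List Int) : List Int :=
  let zd := PySem.Set.ofList z
  let closure := (power_set zd).foldl (fun acc p =>
    if PySem.Set.issubset s p
        && tau.any (fun t => PySem.Set.equal (PySem.Set.diff zd p) (PySem.Set.ofList t)) then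
      acc ++ [p]
    else acc) []
  match closure with
  | [] => []
  | c :: cs => cs.foldl PySem.Set.inter c

-- ===== PORT B =====
-- one loop iteration of B: for an open set o ⊆ z whose closed complement f = z - o contains s,
-- intersect f into the running result (None = no closed set seen yet).
def bStep (zd s : List Int) (acc : Option (List Int)) (o : List Int) : Option (List Int) :=
  if PySem.Set.issubset (PySem.Set.ofList o) zd then
    let f := PySem.Set.diff zd o
    if PySem.Set.issubset s f then
      some (match acc with
            | none => f
            | some a => PySem.Set.inter a f)
    else acc
  else acc

def usual_closure_alt (z : List Int) (tau : List (List Int)) (s : List Int) : List Int :=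
  let zd := PySem.Set.ofList z
  match tau.foldl (bStep zd s) none with
  | none => []
  | some a => a

-- ===== PRECONDITION & SPEC =====
def Spec_usual_closure (z : List Int) (tau : List (List Int)) (s : List Int) (out : List Int) : Prop := out = usual_closure_alt z tau s
instance (z : List Int) (tau : List (List Int)) (s : List Int) (out : List Int) : Decidable (Spec_usual_closure z tau s out) := by unfold Spec_usual_closure; infer_instance

-- ===== CLAIM (what is proved, stated in full; the proofs are below) =====
def Claim_equal_usual_closure : Prop := ∀ (z : List Int) (tau : List (List Int)) (s : List Int), Dom_usual_closure z tau s → Spec_usual_closure z tau s (usual_closure z tau s)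

-- ===== LEMMAS AND PROOFS =====

-- the guard B applies to an element o of tau, as a single Bool
def condO (zd s o : List Int) : Bool :=
  PySem.Set.issubset (PySem.Set.ofList o) zd
    && PySem.Set.issubset s (PySem.Set.diff zd o)

-- the filter A applies to a candidate subset p of z
def condA (zd : List Int) (tau : List (List Int)) (s : List Int) (p : List Int) : Bool :=
  PySem.Set.issubset s p
    && tau.any (fun t => PySem.Set.equal (PySem.Set.diff zd p) (PySem.Set.ofList t))

-- membership in the power set = being a sublist
theorem mem_power_set (l p : List Int) : p ∈ power_set l ↔ p.Sublist l := by
  simp only [power_set, List.mem_flatMap, List.mem_range, PySem.List.mem_combinations_iff]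
  constructor
  · rintro ⟨r, _, hs, _⟩; exact hs
  · intro hs; exact ⟨p.length, Nat.lt_succ_of_le hs.length_le, hs, rfl⟩

-- a sublist of a duplicate-free list is recovered by filtering on membership
theorem filter_mem_of_sublist (l p : List Int) (hn : l.Nodup) (h : p.Sublist l) :
    l.filter (fun x => decide (x ∈ p)) = p := by
  induction h with
  | slnil => simp
  | cons a h ih =>
    rename_i l₁ l₂
    rw [List.nodup_cons] at hn
    have ha : a ∉ l₁ := fun hm => hn.1 (h.subset hm)
    simpa [List.filter_cons, ha] using ih hn.2
  | cons₂ a h ih =>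
    rename_i l₁ l₂
    rw [List.nodup_cons] at hn
    have hcongr : ∀ x ∈ l₂, (decide (x = a ∨ x ∈ l₁)) = (decide (x ∈ l₁)) := by
      intro x hx
      have hxa : x ≠ a := fun he => hn.1 (he ▸ hx)
      simp [hxa]
    rw [List.filter_cons]
    simp only [List.mem_cons, true_or, decide_true, if_pos]
    rw [List.filter_congr hcongr, ih hn.2]

-- folding set-intersection = one filter
theorem foldl_inter (cs : List (List Int)) (a : List Int) :
    cs.foldl PySem.Set.inter a = a.filter (fun x => cs.all (fun c => decide (x ∈ c))) := by
  induction cs generalizing a with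
  | nil => simp
  | cons c cs ih =>
    rw [List.foldl_cons, ih]
    simp only [PySem.Set.inter, List.filter_filter]
    apply List.filter_congr
    intro x _
    rw [Bool.eq_iff_iff]
    simp [List.all_cons, and_comm]

-- B's loop, accumulator already some a with a ⊆ zd
theorem foldl_bStep_some (zd s : List Int) (ts : List (List Int)) (a : List Int)
    (ha : ∀ x ∈ a, x ∈ zd) :
    ts.foldl (bStep zd s) (some a)
      = some (a.filter (fun x => ts.all (fun o => !(condO zd s o && decide (x ∈ o))))) := by
  induction ts generalizing a with
  | nil => simp
  | cons o rest ih =>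
    rw [List.foldl_cons]
    by_cases h1 : PySem.Set.issubset (PySem.Set.ofList o) zd = true
    · by_cases h2 : PySem.Set.issubset s (PySem.Set.diff zd o) = true
      · have hstep : bStep zd s (some a) o = some (PySem.Set.inter a (PySem.Set.diff zd o)) := by
          simp [bStep, h1, h2]
        have ha' : ∀ x ∈ PySem.Set.inter a (PySem.Set.diff zd o), x ∈ zd := by
          intro x hx
          exact ha x (List.mem_filter.mp hx).1
        rw [hstep, ih _ ha']
        simp only [PySem.Set.inter, List.filter_filter]
        apply congrArg some
        apply List.filter_congr
        intro x hx
        rw [Bool.eq_iff_iff]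
        have hxz : x ∈ zd := ha x hx
        simp only [pysem, condO, h1, h2, List.all_cons, Bool.and_eq_true, Bool.and_self,
          Bool.not_eq_true', decide_eq_true_eq,
          Bool.eq_false_iff, ne_eq, List.contains_iff_mem, PySem.Set.mem_diff, hxz, true_and]
        tauto
      · have hstep : bStep zd s (some a) o = some a := by
          simp [bStep, h1, h2]
        rw [hstep, ih _ ha]
        apply congrArg some
        apply List.filter_congr
        intro x _
        simp [condO, h2]
    · have hstep : bStep zd s (some a) o = some a := by
        simp [bStep, h1]
      rw [hstep, ih _ ha]
      apply congrArg some
      apply List.filter_congr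
      intro x _
      simp [condO, h1]

-- B's loop from None
theorem foldl_bStep_none (zd s : List Int) (ts : List (List Int)) :
    ts.foldl (bStep zd s) none
      = if ts.any (condO zd s) then
          some (zd.filter (fun x => ts.all (fun o => !(condO zd s o && decide (x ∈ o)))))
        else none := by
  induction ts with
  | nil => simp
  | cons o rest ih =>
    rw [List.foldl_cons]
    by_cases hc : condO zd s o = true
    · have hc' := hc
      simp only [condO, Bool.and_eq_true] at hc'
      obtain ⟨h1, h2⟩ := hc' 
      have hstep : bStep zd s none o = some (PySem.Set.diff zd o) := by
        simp [bStep, h1, h2]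
      have ha : ∀ x ∈ PySem.Set.diff zd o, x ∈ zd := by
        intro x hx
        exact (List.mem_filter.mp hx).1
      rw [hstep, foldl_bStep_some zd s rest _ ha]
      have hany : (o :: rest).any (condO zd s) = true := by simp [hc]
      rw [if_pos hany]
      simp only [PySem.Set.diff, List.filter_filter]
      apply congrArg some
      apply List.filter_congr
      intro x hx
      rw [Bool.eq_iff_iff]
      simp only [pysem, List.all_cons, Bool.and_eq_true, hc, Bool.not_eq_true',
        decide_eq_true_eq, Bool.eq_false_iff, ne_eq, List.contains_iff_mem, Bool.not_and,
        Bool.not_true, Bool.false_or]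
      tauto
    · have hstep : bStep zd s none o = none := by
        by_cases h1 : PySem.Set.issubset (PySem.Set.ofList o) zd = true
        · have h2 : PySem.Set.issubset s (PySem.Set.diff zd o) = false := by
            cases h2 : PySem.Set.issubset s (PySem.Set.diff zd o) with
            | false => rfl
            | true => exact absurd (by simp [condO, h1, h2]) hc
          simp [bStep, h1, h2]
        · simp [bStep, h1]
      rw [hstep, ih]
      by_cases hany : rest.any (condO zd s) = true
      · rw [if_pos hany, if_pos (by simp [hany])]
        apply congrArg some
        apply List.filter_congr
        intro x _
        simp [hc]
      · rw [if_neg hany, if_neg (by simp [hc, hany])]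

-- correspondence, A → B: every good open set of tau contributes a member of A's closure list
theorem diff_mem_closure (zd s : List Int) (tau : List (List Int)) (o : List Int)
    (ho : o ∈ tau) (hc : condO zd s o = true) :
    PySem.Set.diff zd o ∈ (power_set zd).filter (condA zd tau s) := by
  have hc' := hc
  simp only [condO, Bool.and_eq_true] at hc'
  obtain ⟨h1, h2⟩ := hc'
  rw [List.mem_filter]
  refine ⟨(mem_power_set zd _).mpr List.filter_sublist, ?_⟩
  simp only [condA, Bool.and_eq_true]
  refine ⟨h2, ?_⟩
  rw [List.any_eq_true]
  refine ⟨o, ho, ?_⟩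
  rw [PySem.Set.equal_iff]
  intro y
  have h1' : y ∈ o → y ∈ zd := fun hyo =>
    (PySem.Set.issubset_iff _ _).mp h1 y ((PySem.Set.mem_ofList ..).mpr hyo)
  simp only [PySem.Set.mem_diff, PySem.Set.mem_ofList]
  constructor
  · rintro ⟨hyz, hy⟩
    by_contra hyo
    exact hy ⟨hyz, hyo⟩
  · intro hyo
    exact ⟨h1' hyo, fun h => h.2 hyo⟩

-- correspondence, B → A: every member of A's closure list comes from a good open set of tau
theorem closure_elem_good (zd s : List Int) (tau : List (List Int)) (p : List Int)
    (hp : p ∈ (power_set zd).filter (condA zd tau s)) :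
    ∃ t ∈ tau, condO zd s t = true ∧ (∀ y, (y ∈ zd ∧ y ∉ p) ↔ y ∈ t) := by
  rw [List.mem_filter] at hp
  obtain ⟨hpp, hcA⟩ := hp
  rw [mem_power_set] at hpp
  have hpz : ∀ x ∈ p, x ∈ zd := fun x hx => hpp.subset hx
  simp only [condA, Bool.and_eq_true, List.any_eq_true] at hcA
  obtain ⟨hsub, t, ht, heq⟩ := hcA
  rw [PySem.Set.equal_iff] at heq
  have heq' : ∀ y, (y ∈ zd ∧ y ∉ p) ↔ y ∈ t := by
    intro y
    have := heq y
    simpa [PySem.Set.mem_diff, PySem.Set.mem_ofList] using this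
  have hsub' : ∀ x ∈ s, x ∈ p := (PySem.Set.issubset_iff _ _).mp hsub
  refine ⟨t, ht, ?_, heq'⟩
  simp only [condO, Bool.and_eq_true]
  constructor
  · rw [PySem.Set.issubset_iff]
    intro x hxt
    rw [PySem.Set.mem_ofList] at hxt
    exact ((heq' x).mpr hxt).1
  · rw [PySem.Set.issubset_iff]
    intro x hxs
    rw [PySem.Set.mem_diff]
    have hxp := hsub' x hxs
    exact ⟨hpz x hxp, fun hxt => ((heq' x).mpr hxt).2 hxp⟩

-- ===== VERDICT (by name: the statement is the Claim_ definition above) =====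
theorem usual_closure_spec : Claim_equal_usual_closure := by
  unfold Claim_equal_usual_closure
  intro z tau s _
  unfold Spec_usual_closure
  simp only [usual_closure, usual_closure_alt]
  set zd := PySem.Set.ofList z with hzd
  have hnd : zd.Nodup := PySem.Set.nodup_ofList z
  have hA : ((power_set zd).foldl (fun acc p =>
      if PySem.Set.issubset s p
          && tau.any (fun t => PySem.Set.equal (PySem.Set.diff zd p) (PySem.Set.ofList t)) then
        acc ++ [p] else acc) []) = (power_set zd).filter (condA zd tau s) := by
    simpa using PySem.List.foldl_append_if_eq_filter (condA zd tau s) (power_set zd) []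
  rw [hA, foldl_bStep_none]
  by_cases hAny : tau.any (condO zd s) = true
  · rw [if_pos hAny]
    obtain ⟨o, ho, hco⟩ := List.any_eq_true.mp hAny
    have hmem := diff_mem_closure zd s tau o ho hco
    cases hcl : (power_set zd).filter (condA zd tau s) with
    | nil =>
      rw [hcl] at hmem
      exact absurd hmem List.not_mem_nil
    | cons c cs =>
      have hpoint : ∀ x, x ∈ zd →
          ((∀ q ∈ (power_set zd).filter (condA zd tau s), x ∈ q) ↔
           (∀ o' ∈ tau, condO zd s o' = true → x ∉ o')) := by
        intro x hx
        constructor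
        · intro H o' ho' hc'
          have hdm := H _ (diff_mem_closure zd s tau o' ho' hc')
          exact ((PySem.Set.mem_diff ..).mp hdm).2
        · intro H q hq
          obtain ⟨t, ht, hct, hiff⟩ := closure_elem_good zd s tau q hq
          by_contra hxq
          exact (H t ht hct) ((hiff x).mp ⟨hx, hxq⟩)
      show cs.foldl PySem.Set.inter c
          = zd.filter (fun x => tau.all (fun o => !(condO zd s o && decide (x ∈ o))))
      rw [foldl_inter]
      have hcsub : c.Sublist zd := by
        have hcmem : c ∈ (power_set zd).filter (condA zd tau s) := by
          rw [hcl]; exact List.mem_cons_self ..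
        exact (mem_power_set zd c).mp (List.mem_filter.mp hcmem).1
      rw [← filter_mem_of_sublist zd c hnd hcsub, List.filter_filter]
      apply List.filter_congr
      intro x hx
      rw [Bool.eq_iff_iff]
      have hp := hpoint x hx
      rw [hcl] at hp
      simp only [List.forall_mem_cons] at hp
      simp only [Bool.and_eq_true, decide_eq_true_eq, List.all_eq_true, Bool.not_eq_true',
        Bool.eq_false_iff, ne_eq]
      constructor
      · rintro ⟨h1, h2⟩ o' ho'
        have := hp.mp ⟨h2, fun q hq => h1 q hq⟩ o' ho'
        tauto
      · intro H
        have hall := hp.mpr (fun o' ho' hc' => by have := H o' ho'; tauto)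
        exact ⟨fun q hq => hall.2 q hq, hall.1⟩
  · rw [if_neg hAny]
    have hcl : (power_set zd).filter (condA zd tau s) = [] := by
      rw [List.eq_nil_iff_forall_not_mem]
      intro p hp
      obtain ⟨t, ht, hct, _⟩ := closure_elem_good zd s tau p hp
      exact hAny (List.any_eq_true.mpr ⟨t, ht, hct⟩)
    rw [hcl]
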